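-- pv_equiv track=rewrite | github.com/ariuk44/retake_exam_prep | day_0.py | fullnessQuotient
-- ===== SOURCE A (Python) =====
-- def fullnessQuotient(n):
--     if n < 1:
--         return -1
--     count = 0
--     for base in range(2, 10):
--         temp = n
--         has_zero = False
--         while temp > 0:
--             digit = temp % base
--             temp //= base
--             if digit == 0 and temp > 0:
--                 has_zero = True
--                 break
--         if not has_zero:
--             count += 1
--     return count
-- ===== SOURCE B (Python) =====
-- def fullnessQuotient(n):
--     if n < 1:
--         return -1
--     total = 0
--     for base in range(2, 10):
--         p = 1
--         ok = True
--         while p * base <= n: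
--             if n % (p * base) < p:
--                 ok = False
--                 break
--             p *= base
--         total += ok
--     return total
-- ===== Notes on version B (the rewrite author's own statement) =====
-- stated objective: alternative
-- what changed: B never extracts digits: instead of A's repeated digit = temp % base / temp //= base quotient loop, it tests n directly against growing powers of the base, using that the base-b digit at position k is zero with more digits above iff b^(k+1) <= n and n mod b^(k+1) < b^k; the maintained state is the power p, n is never modified.
import Mathlib
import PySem

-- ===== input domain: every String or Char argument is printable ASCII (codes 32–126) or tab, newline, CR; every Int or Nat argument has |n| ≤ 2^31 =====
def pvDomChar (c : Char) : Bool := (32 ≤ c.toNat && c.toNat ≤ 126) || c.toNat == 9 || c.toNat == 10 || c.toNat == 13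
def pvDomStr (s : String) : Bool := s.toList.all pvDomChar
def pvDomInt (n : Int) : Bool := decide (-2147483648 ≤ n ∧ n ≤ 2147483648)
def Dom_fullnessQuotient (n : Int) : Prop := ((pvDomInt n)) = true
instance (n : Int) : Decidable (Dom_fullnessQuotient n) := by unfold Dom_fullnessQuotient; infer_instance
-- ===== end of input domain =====

-- B replaces A's digit-extraction loop (temp % base / temp //= base) by a test of n against
-- growing powers of the base (state: the power p; n is never modified); return values are identical.

-- ===== PORT A =====
-- A's inner while-loop: pops digits of temp in the given base, breaks with True on an
-- internal zero digit (digit == 0 with a nonzero quotient left), else returns False.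
-- The '1 < base' conjunct in the guard is a totality guard only (A calls it with bases 2..9).
def fqWhileA (temp base : Int) : Bool :=
  if h : 0 < temp ∧ 1 < base then
    let digit := PySem.Int.mod temp base
    let temp' := PySem.Int.floordiv temp base
    if digit == 0 && decide (0 < temp') then true
    else fqWhileA temp' base
  else false
termination_by temp.toNat
decreasing_by
  have hlt : PySem.Int.floordiv temp base < temp :=
    (PySem.Int.floordiv_lt_iff_lt_mul (by omega)).mpr (by nlinarith [h.1, h.2])
  have hnn : 0 ≤ PySem.Int.floordiv temp base :=
    (PySem.Int.le_floordiv_iff_mul_le (by omega)).mpr (by nlinarith [h.1, h.2])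
  omega

def fullnessQuotient (n : Int) : Int :=
  if n < 1 then -1
  else
    (PySem.List.pyRange 2 10 1).foldl
      (fun count base => if !(fqWhileA n base) then count + 1 else count) 0

-- ===== PORT B =====
-- B's inner while-loop: walks powers p of the base while p*base <= n; 'n % (p*base) < p'
-- says the base-'base' digit of n at the position of p is zero (with more digits above).
-- The '1 < base' and '0 < p' conjuncts in the guard are totality guards only
-- (B calls it with bases 2..9 and p a positive power).
def fqPow (n p base : Int) : Bool :=
  if h : p * base ≤ n ∧ 1 < base ∧ 0 < p then
    if PySem.Int.mod n (p * base) < p then false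
    else fqPow n (p * base) base
  else true
termination_by (n - p).toNat
decreasing_by
  have h2 : p + p ≤ p * base := by nlinarith [h.2.1, h.2.2]
  omega

def fullnessQuotient_alt (n : Int) : Int :=
  if n < 1 then -1
  else
    (PySem.List.pyRange 2 10 1).foldl
      (fun total base => total + (if fqPow n 1 base then 1 else 0)) 0

-- ===== PRECONDITION & SPEC =====
def Spec_fullnessQuotient (n : Int) (out : Int) : Prop := out = fullnessQuotient_alt n
instance (n : Int) (out : Int) : Decidable (Spec_fullnessQuotient n out) := by unfold Spec_fullnessQuotient; infer_instance

-- ===== CLAIM (what is proved, stated in full; the proofs are below) =====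
def Claim_equal_fullnessQuotient : Prop := ∀ (n : Int), Dom_fullnessQuotient n → Spec_fullnessQuotient n (fullnessQuotient n)

-- ===== LEMMAS AND PROOFS =====

-- the residue of n modulo p*base decomposes into the digit at p and the residue below p
lemma emod_mul_decomp (n p b : Int) (hp : 0 < p) :
    n % (p * b) = ((n / p) % b) * p + n % p := by
  have h1 := Int.mul_ediv_add_emod n p
  have h2 := Int.mul_ediv_add_emod (n / p) b
  have h3 := Int.mul_ediv_add_emod n (p * b)
  have h4 : n / p / b = n / (p * b) := Int.ediv_ediv_of_nonneg hp.le
  rw [← h4] at h3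
  linear_combination h3 - h1 - p * h2

lemma fqWhileA_zero (base : Int) : fqWhileA 0 base = false := by
  rw [fqWhileA]; simp

lemma key (n base : Int) (hn : 0 < n) (hb : 1 < base) :
    ∀ p, 0 < p → fqWhileA (PySem.Int.floordiv n p) base = !(fqPow n p base) := by
  intro p hp
  fun_induction fqPow n p base with
  | case1 p h hif =>
    -- B breaks: the digit at p is zero with more digits above; A breaks too (returns true)
    obtain ⟨hpbn, _, hp'⟩ := h
    have hpb : 0 < p * base := by positivity
    rw [PySem.Int.mod_eq_emod_of_pos hpb] at hif
    have hdec := emod_mul_decomp n p base hp'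
    have hmnn := Int.emod_nonneg n (by omega : p ≠ (0:Int))
    have hdnn := Int.emod_nonneg (n / p) (by omega : base ≠ (0:Int))
    have hdig : (n / p) % base = 0 := by nlinarith
    have hq1 : 1 ≤ n / (p * base) := by
      rw [Int.le_ediv_iff_mul_le hpb]; omega
    have hpn : p ≤ n := by nlinarith
    have hq0 : 0 < n / p := by
      have h1 : 1 ≤ n / p := by rw [Int.le_ediv_iff_mul_le hp']; omega
      omega
    rw [fqWhileA, dif_pos ⟨by rw [PySem.Int.floordiv_eq_ediv_of_pos hp']; exact hq0, hb⟩]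
    simp only [PySem.Int.mod_eq_emod_of_pos (by omega : (0:Int) < base),
      PySem.Int.floordiv_eq_ediv_of_pos (by omega : (0:Int) < base),
      PySem.Int.floordiv_eq_ediv_of_pos hp', Int.ediv_ediv_of_nonneg hp'.le]
    rw [if_pos]
    · simp
    · simp [hdig]; omega
  | case2 p h hif ih =>
    obtain ⟨hpbn, _, hp'⟩ := h
    have hpb : 0 < p * base := by positivity
    rw [PySem.Int.mod_eq_emod_of_pos hpb] at hif
    have hdec := emod_mul_decomp n p base hp'
    have hmp_lt := Int.emod_lt_of_pos n hp'
    have hdig : (n / p) % base ≠ 0 := by intro h0; rw [h0] at hdec; omega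
    have hpn : p ≤ n := by nlinarith
    have hq0 : 0 < n / p := by
      have h1 : 1 ≤ n / p := by rw [Int.le_ediv_iff_mul_le hp']; omega
      omega
    rw [fqWhileA, dif_pos ⟨by rw [PySem.Int.floordiv_eq_ediv_of_pos hp']; exact hq0, hb⟩]
    simp only [PySem.Int.mod_eq_emod_of_pos (by omega : (0:Int) < base),
      PySem.Int.floordiv_eq_ediv_of_pos (by omega : (0:Int) < base),
      PySem.Int.floordiv_eq_ediv_of_pos hp', Int.ediv_ediv_of_nonneg hp'.le]
    rw [if_neg (by simp [hdig])]
    rw [PySem.Int.floordiv_eq_ediv_of_pos hpb] at ih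
    exact ih hpb
  | case3 p h =>
    have hnpb : n < p * base := by
      have := fun hle => h ⟨hle, hb, hp⟩
      omega
    by_cases hpn : p ≤ n
    · have hq0 : 0 < n / p := by
        have h1 : 1 ≤ n / p := by rw [Int.le_ediv_iff_mul_le hp]; omega
        omega
      have htz : n / p / base = 0 := by
        rw [Int.ediv_ediv_of_nonneg hp.le]
        exact Int.ediv_eq_zero_of_lt (by omega) hnpb
      rw [fqWhileA, dif_pos ⟨by rw [PySem.Int.floordiv_eq_ediv_of_pos hp]; exact hq0, hb⟩]
      simp only [PySem.Int.mod_eq_emod_of_pos (by omega : (0:Int) < base),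
        PySem.Int.floordiv_eq_ediv_of_pos (by omega : (0:Int) < base),
        PySem.Int.floordiv_eq_ediv_of_pos hp, htz]
      rw [if_neg (by simp)]
      simp [fqWhileA_zero]
    · have hnp0 : n / p = 0 := Int.ediv_eq_zero_of_lt hn.le (by omega)
      rw [PySem.Int.floordiv_eq_ediv_of_pos hp, hnp0, fqWhileA_zero]
      rfl

-- ===== VERDICT (by name: the statement is the Claim_ definition above) =====
theorem fullnessQuotient_spec : Claim_equal_fullnessQuotient := by
  intro n _
  unfold Spec_fullnessQuotient fullnessQuotient fullnessQuotient_alt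
  by_cases hn : n < 1
  · simp [hn]
  · simp only [hn, if_false]
    have hA : ∀ b, 1 < b → fqWhileA n b = !(fqPow n 1 b) := by
      intro b hb
      have := key n b (by omega) hb 1 one_pos
      rwa [show PySem.Int.floordiv n 1 = n by
        rw [PySem.Int.floordiv_eq_ediv_of_pos one_pos, Int.ediv_one]] at this
    have L : ∀ (c : Int) (x : Bool), (if !!x then c + 1 else c) = c + (if x then 1 else 0) := by
      intro c x; cases x <;> simp
    simp only [show PySem.List.pyRange 2 10 1 = [2,3,4,5,6,7,8,9] from by decide, List.foldl]
    rw [hA 2 (by norm_num), hA 3 (by norm_num), hA 4 (by norm_num), hA 5 (by norm_num),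
        hA 6 (by norm_num), hA 7 (by norm_num), hA 8 (by norm_num), hA 9 (by norm_num)]
    simp only [L]
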